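-- pv_equiv track=rewrite | github.com/jayfirns/Anchor_Infrastructure_llc | proposal-generator/scoring.py | _determine_segment
-- ===== SOURCE A (Python) =====
-- def _determine_segment(answers: dict, segment_map: dict) -> str:
--     """Match answers to the best-fit client segment."""
--     if not segment_map:
--         return "General"
--
--     segment_scores = {}
--     for segment, indicators in segment_map.items():
--         score = 0
--         for question_id, matching_answers in indicators.items():
--             answer = answers.get(question_id)
--             if str(answer) in [str(a) for a in matching_answers]:
--                 score += 1
--         segment_scores[segment] = score
--
--     if not segment_scores or max(segment_scores.values()) == 0:
--         return "General"
--
--     return max(segment_scores, key=segment_scores.get)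
-- ===== SOURCE B (Python) =====
-- def _determine_segment(answers: dict, segment_map: dict) -> str:
--     """Best-fit segment via an inverted question -> [(segment, options)] index."""
--     # Phase 1: invert segment_map into a question-keyed index.
--     by_question = {}
--     for segment, indicators in segment_map.items():
--         for question_id, matching_answers in indicators.items():
--             entry = (segment, [str(a) for a in matching_answers])
--             by_question[question_id] = by_question.get(question_id, []) + [entry]
--
--     # Phase 2: walk by question, stringifying each answer once, tallying segments.
--     scores = {}
--     for question_id, entries in by_question.items():
--         answer = str(answers.get(question_id))
--         for segment, options in entries:
--             if answer in options:
--                 scores[segment] = scores.get(segment, 0) + 1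
--
--     # Phase 3: first max-scoring segment in segment_map order, if any score is positive.
--     best_segment, best_score = "General", 0
--     for segment in segment_map:
--         score = scores.get(segment, 0)
--         if score > best_score:
--             best_segment, best_score = segment, score
--     return best_segment
-- ===== Notes on version B (the rewrite author's own statement) =====
-- stated objective: alternative
-- what changed: B replaces A's segment-by-segment scoring plus two max() scans with a three-phase inverted-index algorithm: it first builds a question -> [(segment, options)] index from segment_map, then traverses BY QUESTION (stringifying each answer once per question, not once per segment-question pair) accumulating a segment tally dict, and finally takes the first best-scoring segment in segment_map order with threshold 0 (which also subsumes A's empty-map guard).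
import Mathlib
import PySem

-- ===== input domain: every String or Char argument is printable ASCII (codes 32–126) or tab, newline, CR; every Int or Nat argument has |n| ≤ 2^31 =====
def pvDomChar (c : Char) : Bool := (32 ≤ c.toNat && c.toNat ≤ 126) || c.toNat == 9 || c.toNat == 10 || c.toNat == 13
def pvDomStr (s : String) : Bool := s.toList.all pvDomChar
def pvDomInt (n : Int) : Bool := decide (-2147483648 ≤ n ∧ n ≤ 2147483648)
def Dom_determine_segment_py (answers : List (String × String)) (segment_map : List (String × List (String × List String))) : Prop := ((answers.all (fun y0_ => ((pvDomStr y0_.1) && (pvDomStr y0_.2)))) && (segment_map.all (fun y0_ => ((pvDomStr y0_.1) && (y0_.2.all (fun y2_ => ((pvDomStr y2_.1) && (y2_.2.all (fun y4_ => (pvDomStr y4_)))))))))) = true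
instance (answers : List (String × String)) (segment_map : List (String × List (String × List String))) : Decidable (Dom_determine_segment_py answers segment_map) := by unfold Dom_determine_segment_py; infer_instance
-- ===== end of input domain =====

-- B replaces A's per-segment scoring + two max() scans by a three-phase inverted-index algorithm
-- (question -> [(segment, options)] index, then a by-question tally, then an argmax over the
-- original segment order); objective: alternative (same cost, different traversal).


-- str(answers.get(question_id)): Python str(None) = "None", str of a str is itself (exact on String values)
def pyStrOfOpt (o : Option String) : String :=
  match o with
  | none => "None"
  | some s => s

-- ===== PORT A =====
-- inner loop of A: score = 0; for question_id, matching_answers in indicators.items(): …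
-- ([str(a) for a in matching_answers] is the identity on String values, so membership is tested in qm.2)
def scoreOfA (aD : PySem.Dict String String) (indicators : List (String × List String)) : Int :=
  (PySem.Dict.ofList indicators).items.foldl
    (fun score qm =>
      if pyStrOfOpt (aD.get? qm.1) ∈ qm.2 then score + 1 else score) 0

-- segment_scores is built, then scanned by the two max() calls (split as a helper so both stay literal)
def scanScores (segment_scores : PySem.Dict String Int) : String :=
  if segment_scores.size = 0 ∨ (PySem.List.max? segment_scores.values (fun v => v)).getD 0 = 0 then "General"
  else
    match PySem.List.max? segment_scores.keys (fun k => segment_scores.getD k 0) with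
    | some k => k
    | none => "General"

def determine_segment_py (answers : List (String × String)) (segment_map : List (String × List (String × List String))) : String :=
  if (PySem.Dict.ofList segment_map : PySem.Dict String (List (String × List String))).size = 0 then "General"
  else
    scanScores
      ((PySem.Dict.ofList segment_map).items.foldl
        (fun d p => d.insert p.1 (scoreOfA (PySem.Dict.ofList answers) p.2)) PySem.Dict.empty)

-- ===== PORT B =====
-- phase 1: by_question[question_id] = by_question.get(question_id, []) + [(segment, options)]
-- (dict.get(k, dflt) followed by assignment of a function of it is exactly Dict.modify)
def pvByQuestion (segment_map : List (String × List (String × List String))) :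
    PySem.Dict String (List (String × List String)) :=
  (PySem.Dict.ofList segment_map).items.foldl
    (fun d p =>
      (PySem.Dict.ofList p.2).items.foldl
        (fun d qm => d.modify qm.1 [] (fun v => v ++ [(p.1, qm.2)])) d)
    PySem.Dict.empty

-- phase 2: answer = str(answers.get(question_id)); scores[segment] = scores.get(segment, 0) + 1
def pvScoresB (answers : List (String × String)) (segment_map : List (String × List (String × List String))) :
    PySem.Dict String Int :=
  (pvByQuestion segment_map).items.foldl
    (fun s qe =>
      qe.2.foldl
        (fun s e =>
          if pyStrOfOpt ((PySem.Dict.ofList answers).get? qe.1) ∈ e.2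
          then s.modify e.1 0 (fun v => v + 1) else s)
        s)
    PySem.Dict.empty

-- phase 3: running argmax over segment_map's keys, seeded with ("General", 0)
def determine_segment_py_alt (answers : List (String × String)) (segment_map : List (String × List (String × List String))) : String :=
  ((PySem.Dict.ofList segment_map : PySem.Dict String (List (String × List String))).keys.foldl
    (fun bs seg =>
      if bs.2 < (pvScoresB answers segment_map).getD seg 0
      then (seg, (pvScoresB answers segment_map).getD seg 0) else bs)
    ("General", 0)).1

-- ===== PRECONDITION & SPEC =====
def Spec_determine_segment_py (answers : List (String × String)) (segment_map : List (String × List (String × List String))) (out : String) : Prop := out = determine_segment_py_alt answers segment_map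
instance (answers : List (String × String)) (segment_map : List (String × List (String × List String))) (out : String) : Decidable (Spec_determine_segment_py answers segment_map out) := by unfold Spec_determine_segment_py; infer_instance

-- ===== CLAIM (what is proved, stated in full; the proofs are below) =====
def Claim_equal_determine_segment_py : Prop := ∀ (answers : List (String × String)) (segment_map : List (String × List (String × List String))), Dom_determine_segment_py answers segment_map → Spec_determine_segment_py answers segment_map (determine_segment_py answers segment_map)

-- ===== LEMMAS AND PROOFS =====

-- A's inner scoring loop is a countP
def scoreCount (aD : PySem.Dict String String) (indicators : List (String × List String)) : Nat :=
  (PySem.Dict.ofList indicators).items.countP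
    (fun qm => decide (pyStrOfOpt (aD.get? qm.1) ∈ qm.2))

theorem foldl_if_add_eq_countP {α : Type} (P : α → Prop) [DecidablePred P] :
    ∀ (l : List α) (s : Int), l.foldl (fun s x => if P x then s + 1 else s) s
      = s + (l.countP (fun x => decide (P x)) : Nat) := by
  intro l
  induction l with
  | nil => intro s; simp
  | cons x t ih =>
    intro s
    by_cases h : P x
    · simp only [List.foldl_cons, List.countP_cons, h, if_pos, decide_true]
      rw [ih]; push_cast; ring
    · simp only [List.foldl_cons, List.countP_cons, h, if_neg, not_false_iff, decide_false]
      rw [ih]; push_cast; ring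

theorem scoreOfA_eq_count (aD : PySem.Dict String String) (ind : List (String × List String)) :
    scoreOfA aD ind = (scoreCount aD ind : Int) := by
  unfold scoreOfA scoreCount
  rw [foldl_if_add_eq_countP]
  simp

-- the flattened triples (question, (segment, options)) of segment_map, in A's traversal order
def pvTriples (segment_map : List (String × List (String × List String))) :
    List (String × (String × List String)) :=
  (PySem.Dict.ofList segment_map).items.flatMap
    (fun p => (PySem.Dict.ofList p.2).items.map (fun qm => (qm.1, (p.1, qm.2))))

-- predicate: triple t matches the answers and belongs to segment seg
def pvHit (aD : PySem.Dict String String) (seg : String)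
    (t : String × (String × List String)) : Bool :=
  (t.2.1 == seg) && decide (pyStrOfOpt (aD.get? t.1) ∈ t.2.2)

-- ---- generic counting lemmas ----

theorem pv_countP_flatMap {α β : Type} (g : α → List β) (p : β → Bool) :
    ∀ (l : List α), (l.flatMap g).countP p = (l.map (fun x => (g x).countP p)).sum := by
  intro l
  induction l with
  | nil => simp
  | cons x t ih => simp [List.countP_append, ih]

theorem pv_sum_map_add {β : Type} (f g : β → Nat) :
    ∀ (l : List β), (l.map (fun x => f x + g x)).sum = (l.map f).sum + (l.map g).sum := by
  intro l
  induction l with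
  | nil => simp
  | cons x t ih => simp [ih]; omega

theorem pv_sum_ind_zero {β : Type} (key : β → String) (f : β → Nat) (k : String) :
    ∀ (l : List β), k ∉ l.map key → (l.map (fun p => if key p == k then f p else 0)).sum = 0 := by
  intro l
  induction l with
  | nil => simp
  | cons p t ih =>
    intro h
    simp only [List.map_cons, List.mem_cons, not_or] at h
    have hne : ¬ (key p == k) = true := by
      simp only [beq_iff_eq]
      exact fun he => h.1 he.symm
    simp only [List.map_cons, List.sum_cons, if_neg hne]
    simpa using ih h.2

-- summing an indicator keyed by a Nodup key list hits exactly once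
theorem pv_sum_key_single {β : Type} (key : β → String) (f : β → Nat) :
    ∀ (l : List β) (p0 : β), (l.map key).Nodup → p0 ∈ l →
      (l.map (fun p => if key p == key p0 then f p else 0)).sum = f p0 := by
  intro l
  induction l with
  | nil => intro p0 _ h; cases h
  | cons p t ih =>
    intro p0 hnd hp0
    simp only [List.map_cons, List.nodup_cons] at hnd
    rcases List.mem_cons.mp hp0 with rfl | hp0t
    · simp only [List.map_cons, List.sum_cons, beq_self_eq_true, if_pos]
      rw [pv_sum_ind_zero key f (key p0) t hnd.1]
      omega
    · have hne : ¬ (key p == key p0) = true := by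
        simp only [beq_iff_eq]
        intro he
        exact hnd.1 (he ▸ List.mem_map_of_mem hp0t)
      simp only [List.map_cons, List.sum_cons, if_neg hne]
      simpa using ih p0 hnd.2 hp0t

theorem pv_sum_one_zero (k : String) :
    ∀ (ks : List String), k ∉ ks → (ks.map (fun q => if k == q then (1 : Nat) else 0)).sum = 0 := by
  intro ks
  induction ks with
  | nil => simp
  | cons q t ih =>
    intro h
    simp only [List.mem_cons, not_or] at h
    simp only [List.map_cons, List.sum_cons, if_neg (by simpa using h.1 : ¬ (k == q) = true)]
    simpa using ih h.2

theorem pv_sum_one (k : String) :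
    ∀ (ks : List String), ks.Nodup → k ∈ ks → (ks.map (fun q => if k == q then (1 : Nat) else 0)).sum = 1 := by
  intro ks
  induction ks with
  | nil => intro _ h; cases h
  | cons q t ih =>
    intro hnd hk
    simp only [List.nodup_cons] at hnd
    rcases List.mem_cons.mp hk with rfl | hkt
    · simp only [List.map_cons, List.sum_cons, beq_self_eq_true, if_pos]
      rw [pv_sum_one_zero k t hnd.1]
    · have hne : ¬ (k == q) = true := by
        simp only [beq_iff_eq]
        rintro rfl
        exact hnd.1 hkt
      simp only [List.map_cons, List.sum_cons, if_neg hne]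
      simpa using ih hnd.2 hkt

-- regrouping a countP by a Nodup key cover
theorem pv_regroup {α : Type} (key : α → String) (P : α → Bool) (ks : List String)
    (hnd : ks.Nodup) :
    ∀ (L : List α), (∀ t ∈ L, key t ∈ ks) →
      (ks.map (fun q => L.countP (fun t => P t && (key t == q)))).sum = L.countP P := by
  intro L
  induction L with
  | nil => simp
  | cons t L' ih =>
    intro hcov
    have hcov' : ∀ x ∈ L', key x ∈ ks := fun x hx => hcov x (List.mem_cons_of_mem t hx)
    have hkt : key t ∈ ks := hcov t (List.mem_cons_self ..)
    have hsplit : (ks.map (fun q => (t :: L').countP (fun x => P x && (key x == q)))).sum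
        = (ks.map (fun q => L'.countP (fun x => P x && (key x == q)))).sum
          + (ks.map (fun q => if P t && (key t == q) then 1 else 0)).sum := by
      rw [← pv_sum_map_add]
      apply congrArg List.sum
      apply List.map_congr_left
      intro q _
      simp [List.countP_cons]
    rw [hsplit, ih hcov', List.countP_cons]
    congr 1
    by_cases hP : P t = true
    · simp only [hP, Bool.true_and]
      exact pv_sum_one (key t) ks hnd hkt
    · simp only [Bool.not_eq_true] at hP
      simp [hP]

-- ---- phase 1: the by-question index, characterised ----

theorem pvByQuestion_eq_fold (segment_map : List (String × List (String × List String))) :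
    pvByQuestion segment_map
      = (pvTriples segment_map).foldl
          (fun d t => d.modify t.1 [] (fun v => v ++ [t.2])) PySem.Dict.empty := by
  unfold pvByQuestion pvTriples
  rw [List.foldl_flatMap]
  apply PySem.List.foldl_congr_mem
  intro d p _
  rw [List.foldl_map]

theorem pvByQuestion_getD (segment_map : List (String × List (String × List String))) (q : String) :
    (pvByQuestion segment_map).getD q []
      = ((pvTriples segment_map).filter (fun t => t.1 == q)).map (fun t => t.2) := by
  rw [pvByQuestion_eq_fold]
  rw [PySem.Dict.getD_foldl_modify_append]
  simp

theorem pvByQuestion_keys (segment_map : List (String × List (String × List String))) :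
    (pvByQuestion segment_map).keys
      = PySem.Set.ofList ((pvTriples segment_map).map (fun t => t.1)) := by
  rw [pvByQuestion_eq_fold]
  rw [PySem.Dict.keys_foldl_modify_key]
  simp [PySem.Set.update_nil_left]

theorem pvByQuestion_keys_nodup (segment_map : List (String × List (String × List String))) :
    (pvByQuestion segment_map).keys.Nodup := by
  rw [pvByQuestion_keys]
  exact PySem.Set.nodup_ofList _

-- ---- phase 2: scores characterised as a count over the triples ----

theorem pvScoresB_getD (answers : List (String × String))
    (segment_map : List (String × List (String × List String))) (seg : String) :
    (pvScoresB answers segment_map).getD seg 0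
      = ((pvTriples segment_map).countP (pvHit (PySem.Dict.ofList answers) seg) : Nat) := by
  unfold pvScoresB
  set aD := PySem.Dict.ofList answers with haD
  set L := pvTriples segment_map with hL
  -- the inner conditional fold is a fold of modify over a filtered, projected list
  have hinner : ∀ (qe : String × List (String × List String)) (s : PySem.Dict String Int),
      qe.2.foldl (fun s e => if pyStrOfOpt (aD.get? qe.1) ∈ e.2
          then s.modify e.1 0 (fun v => v + 1) else s) s
        = (((qe.2.filter (fun e => decide (pyStrOfOpt (aD.get? qe.1) ∈ e.2))).map
              (fun e => e.1)).foldl (fun s x => s.modify x 0 (fun v => v + 1)) s) := by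
    intro qe s
    rw [List.foldl_map, PySem.List.foldl_ite_eq_foldl_filter]
  -- so scores is one modify-fold over the matched-segment multiset M
  have hM : (pvByQuestion segment_map).items.foldl
      (fun s qe => qe.2.foldl (fun s e => if pyStrOfOpt (aD.get? qe.1) ∈ e.2
          then s.modify e.1 0 (fun v => v + 1) else s) s)
        (PySem.Dict.empty : PySem.Dict String Int)
      = (((pvByQuestion segment_map).items.flatMap
            (fun qe => (qe.2.filter (fun e => decide (pyStrOfOpt (aD.get? qe.1) ∈ e.2))).map
              (fun e => e.1))).foldl
          (fun s x => s.modify x 0 (fun v => v + 1))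
          (PySem.Dict.empty : PySem.Dict String Int)) := by
    rw [List.foldl_flatMap]
    apply PySem.List.foldl_congr_mem
    intro s qe _
    exact hinner qe s
  rw [hM, PySem.Dict.getD_foldl_modify_add_one]
  rw [PySem.Dict.getD_empty]
  set M := (pvByQuestion segment_map).items.flatMap
      (fun qe => (qe.2.filter (fun e => decide (pyStrOfOpt (aD.get? qe.1) ∈ e.2))).map
        (fun e => e.1)) with hMdef
  -- count in M = regrouped countP over the triples
  have hitems : (pvByQuestion segment_map).items
      = (pvByQuestion segment_map).keys.map (fun q => (q, (pvByQuestion segment_map).getD q [])) :=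
    PySem.Dict.items_eq_map_keys _ (pvByQuestion_keys_nodup segment_map) []
  have hcount : M.count seg = L.countP (pvHit aD seg) := by
    rw [hMdef, hitems, List.flatMap_map, List.count_eq_countP, pv_countP_flatMap]
    have hper : ∀ q ∈ (pvByQuestion segment_map).keys,
        ((((pvByQuestion segment_map).getD q []).filter
            (fun e => decide (pyStrOfOpt (aD.get? q) ∈ e.2))).map (fun e => e.1)).countP (· == seg)
          = L.countP (fun t => pvHit aD seg t && (t.1 == q)) := by
      intro q _
      rw [pvByQuestion_getD, ← hL, List.filter_map, List.countP_map, List.countP_map,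
        List.countP_filter, List.countP_filter]
      apply List.countP_congr
      intro t _
      simp only [Function.comp]
      by_cases hq : (t.1 == q) = true
      · have : aD.get? t.1 = aD.get? q := by rw [beq_iff_eq.mp hq]
        simp [pvHit, this, hq]
      · simp only [Bool.not_eq_true] at hq
        simp [pvHit, hq]
    rw [List.map_congr_left (fun q hq => hper q hq)]
    rw [pvByQuestion_keys, ← hL]
    apply pv_regroup (fun t => t.1) (pvHit aD seg)
      (PySem.Set.ofList (L.map (fun t => t.1))) (PySem.Set.nodup_ofList _)
    intro t ht
    rw [PySem.Set.mem_ofList]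
    exact List.mem_map_of_mem ht
  rw [hcount]
  ring

-- ---- the triple count for a segment of the map is A's score ----

theorem pv_countP_triples (answers : List (String × String))
    (segment_map : List (String × List (String × List String)))
    (p0 : String × List (String × List String))
    (hp0 : p0 ∈ (PySem.Dict.ofList segment_map).items) :
    (pvTriples segment_map).countP (pvHit (PySem.Dict.ofList answers) p0.1)
      = scoreCount (PySem.Dict.ofList answers) p0.2 := by
  set aD := PySem.Dict.ofList answers with haD
  unfold pvTriples
  rw [pv_countP_flatMap]
  have hpart : ∀ p : String × List (String × List String), (((PySem.Dict.ofList p.2).items.map (fun qm => (qm.1, (p.1, qm.2)))).countP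
      (pvHit aD p0.1))
      = (if p.1 == p0.1 then scoreCount aD p.2 else 0) := by
    intro p
    rw [List.countP_map]
    by_cases hp : (p.1 == p0.1) = true
    · rw [if_pos hp]
      unfold scoreCount
      apply List.countP_congr
      intro qm _
      simp [pvHit, Function.comp, hp]
    · rw [if_neg hp]
      have : ∀ qm ∈ (PySem.Dict.ofList p.2).items,
          (pvHit aD p0.1 ∘ fun qm => (qm.1, (p.1, qm.2))) qm = false := by
        intro qm _
        simp only [Bool.not_eq_true] at hp
        simp [pvHit, Function.comp, hp]
      rw [List.countP_eq_zero.mpr (by intro x hx; simpa using this x hx)]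
  rw [List.map_congr_left (fun p _ => hpart p)]
  have hnd : ((PySem.Dict.ofList segment_map).items.map (fun p => p.1)).Nodup :=
    PySem.Dict.nodup_keys_ofList segment_map
  have := pv_sum_key_single (fun p => p.1) (fun p => scoreCount aD p.2)
    (PySem.Dict.ofList segment_map).items p0 hnd hp0
  simpa using this

-- scores.get(segment, 0) is A's score, for every segment of the map
theorem pvScoresB_eq_scoreOfA (answers : List (String × String))
    (segment_map : List (String × List (String × List String)))
    (p0 : String × List (String × List String))
    (hp0 : p0 ∈ (PySem.Dict.ofList segment_map).items) :
    (pvScoresB answers segment_map).getD p0.1 0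
      = scoreOfA (PySem.Dict.ofList answers) p0.2 := by
  rw [pvScoresB_getD, pv_countP_triples answers segment_map p0 hp0, scoreOfA_eq_count]

-- ---- the argmax machinery (shared shape of both final scans) ----

def pvStep (b q : String × Int) : String × Int := if b.2 < q.2 then q else b

theorem pvStep_mono : ∀ (t : List (String × Int)) (a : String × Int), a.2 ≤ (t.foldl pvStep a).2 := by
  intro t
  induction t with
  | nil => intro a; simp
  | cons p t ih =>
    intro a
    simp only [List.foldl_cons]
    by_cases h : a.2 < p.2
    · exact le_trans (le_of_lt h) (by simpa [pvStep, h] using ih p)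
    · simpa [pvStep, h] using ih a

-- two argmax folds with seeds of equal score either both keep their seed or converge, strictly improving
theorem pvStep_seed : ∀ (t : List (String × Int)) (a b : String × Int), a.2 = b.2 →
    (t.foldl pvStep a = a ∧ t.foldl pvStep b = b) ∨
    (t.foldl pvStep a = t.foldl pvStep b ∧ a.2 < (t.foldl pvStep a).2) := by
  intro t
  induction t with
  | nil => intro a b _; exact Or.inl ⟨rfl, rfl⟩
  | cons p t ih =>
    intro a b hab
    simp only [List.foldl_cons]
    by_cases h : a.2 < p.2
    · right
      have hb : b.2 < p.2 := hab ▸ h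
      constructor
      · simp [pvStep, h, hb]
      · have := pvStep_mono t p
        simp only [pvStep, h, if_pos]
        exact lt_of_lt_of_le h this
    · have hb : ¬ b.2 < p.2 := hab ▸ h
      simpa [pvStep, h, hb] using ih a b hab

-- running max? over a nonempty list is a plain foldl from its head
theorem max?_cons {α κ : Type} [LinearOrder κ] (key : α → κ) :
    ∀ (t : List α) (m : α), PySem.List.max? (m :: t) key =
      some (t.foldl (fun m y => if key m < key y then y else m) m) := by
  have aux : ∀ (t : List α) (m : α),
      (t.foldl (fun acc x => match acc with
        | none => some x
        | some m => if key m < key x then some x else some m) (some m)) =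
      some (t.foldl (fun m y => if key m < key y then y else m) m) := by
    intro t
    induction t with
    | nil => intro m; rfl
    | cons x t ih =>
      intro m
      simp only [List.foldl_cons]
      by_cases h : key m < key x <;> simp [h, ih]
  intro t m
  simpa [PySem.List.max?] using aux t m

-- max? along a mapped list
theorem max?_map {α β κ : Type} [LinearOrder κ] (h : α → β) (key : β → κ) :
    ∀ (l : List α), PySem.List.max? (l.map h) key = (PySem.List.max? l (fun x => key (h x))).map h := by
  have aux : ∀ (l : List α) (acc : Option α),
      (List.foldl (fun acc x => match acc with
        | none => some x
        | some m => if key m < key x then some x else some m) (acc.map h) (l.map h)) =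
      (List.foldl (fun a x => match a with
        | none => some x
        | some m => if key (h m) < key (h x) then some x else some m) acc l).map h := by
    intro l
    induction l with
    | nil => intro acc; rfl
    | cons x t ih =>
      intro acc
      cases acc with
      | none => simpa using ih (some x)
      | some m =>
        simp only [List.map_cons, List.foldl_cons]
        by_cases hk : key (h m) < key (h x)
        · simpa [hk] using ih (some x)
        · simpa [hk] using ih (some m)
  intro l
  have := aux l none
  simpa [PySem.List.max?] using this

-- max? is determined by the key's values on the members
theorem max?_congr {α κ : Type} [LinearOrder κ] (k1 k2 : α → κ) :
    ∀ (l : List α), (∀ y ∈ l, k1 y = k2 y) → PySem.List.max? l k1 = PySem.List.max? l k2 := by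
  have aux : ∀ (t : List α) (m : α), (∀ y ∈ t, k1 y = k2 y) → k1 m = k2 m →
      t.foldl (fun m y => if k1 m < k1 y then y else m) m =
      t.foldl (fun m y => if k2 m < k2 y then y else m) m := by
    intro t
    induction t with
    | nil => intro m _ _; rfl
    | cons y t ih =>
      intro m hmem hm
      have hy : k1 y = k2 y := hmem y (by simp)
      simp only [List.foldl_cons, hm, hy]
      by_cases h : k2 m < k2 y
      · simp only [h, if_pos]
        exact ih y (fun z hz => hmem z (by simp [hz])) hy
      · simp only [h, if_neg, not_false_iff]
        exact ih m (fun z hz => hmem z (by simp [hz])) hm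
  intro l hmem
  cases l with
  | nil => rfl
  | cons m t =>
    rw [max?_cons, max?_cons]
    exact congrArg some (aux t m (fun y hy => hmem y (by simp [hy])) (hmem m (by simp)))

-- the foldl of max?_cons on pairs keyed by .2 IS pvStep up to argument order of the ite
theorem foldl_key2_eq_pvStep : ∀ (t : List (String × Int)) (m : String × Int),
    t.foldl (fun m y => if m.2 < y.2 then y else m) m = t.foldl pvStep m := by
  intro t
  induction t with
  | nil => intro m; rfl
  | cons y t ih => intro m; simp only [List.foldl_cons, pvStep]; exact ih _

-- every score produced by the A-side score dict is nonneg
theorem scored_nonneg (aD : PySem.Dict String String)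
    (items : List (String × List (String × List String))) :
    ∀ q ∈ items.map (fun p => (p.1, scoreOfA aD p.2)), 0 ≤ q.2 := by
  intro q hq
  rcases List.mem_map.mp hq with ⟨p, _, rfl⟩
  rw [scoreOfA_eq_count]
  positivity

-- ---- A equals the argmax fold over the scored segments ----

theorem A_eq_fold (answers : List (String × String))
    (segment_map : List (String × List (String × List String))) :
    determine_segment_py answers segment_map
      = (((PySem.Dict.ofList segment_map).items.map
            (fun p => (p.1, scoreOfA (PySem.Dict.ofList answers) p.2))).foldl
          pvStep ("General", 0)).1 := by
  unfold determine_segment_py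
  set aD := PySem.Dict.ofList answers with haD
  set sD : PySem.Dict String (List (String × List String)) := PySem.Dict.ofList segment_map with hsD
  set items := sD.items with hitems
  set scored : List (String × Int) := items.map (fun p => (p.1, scoreOfA aD p.2)) with hscored
  have hnodup : (items.map Prod.fst).Nodup := PySem.Dict.nodup_keys_ofList segment_map
  have hfresh : ∀ p ∈ items, (PySem.Dict.empty : PySem.Dict String Int).contains p.1 = false := by
    intro p _; exact PySem.Dict.contains_empty p.1
  have hd : (items.foldl (fun d p => d.insert p.1 (scoreOfA aD p.2)) PySem.Dict.empty).items
      = scored := by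
    simpa using PySem.Dict.items_foldl_insert_fresh items (fun p => p.1)
      (fun p => scoreOfA aD p.2) PySem.Dict.empty hfresh hnodup
  set d := items.foldl (fun d p => d.insert p.1 (scoreOfA aD p.2)) PySem.Dict.empty with hdd
  have hkeys : d.keys = scored.map Prod.fst := by
    show d.items.map Prod.fst = scored.map Prod.fst
    rw [hd]
  have hvals : d.values = scored.map Prod.snd := by
    show d.items.map Prod.snd = scored.map Prod.snd
    rw [hd]
  have hkeysnd : d.keys.Nodup := by
    rw [hkeys, hscored, List.map_map]
    exact hnodup
  have hgetD : ∀ q ∈ scored, d.getD q.1 0 = q.2 := by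
    intro q hq
    exact PySem.Dict.getD_of_mem_items d (by rw [hd]; exact hq) hkeysnd 0
  by_cases hsc : scored = []
  · have hitems0 : items = [] := by
      rw [hscored] at hsc
      exact List.map_eq_nil_iff.mp hsc
    have hsz0 : sD.size = 0 := by
      show sD.items.length = 0
      rw [← hitems, hitems0]; rfl
    simp [hsz0, hsc]
  · obtain ⟨x, t, hxt⟩ : ∃ x t, scored = x :: t := by
      cases h : scored with
      | nil => exact absurd h hsc
      | cons x t => exact ⟨x, t, rfl⟩
    have hsz : ¬ sD.size = 0 := by
      intro h0
      apply hsc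
      have : items.length = 0 := h0
      have : items = [] := List.eq_nil_of_length_eq_zero this
      rw [hscored, this]; rfl
    rw [if_neg hsz]
    unfold scanScores
    have hdsz : ¬ d.size = 0 := by
      show ¬ d.items.length = 0
      rw [hd, hxt]; simp
    have hnn : ∀ q ∈ scored, 0 ≤ q.2 := scored_nonneg aD items
    set m : String × Int := t.foldl pvStep x with hm
    have hmaxv : PySem.List.max? d.values (fun v => v) = some m.2 := by
      rw [hvals, max?_map Prod.snd (fun v => v) scored, hxt, max?_cons, foldl_key2_eq_pvStep]
      rfl
    have hmaxk : PySem.List.max? d.keys (fun k => d.getD k 0) = some m.1 := by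
      rw [hkeys, max?_map Prod.fst (fun k => d.getD k 0) scored,
        max?_congr (fun q => d.getD q.1 0) Prod.snd scored hgetD,
        hxt, max?_cons, foldl_key2_eq_pvStep]
      rfl
    rw [hmaxv, hmaxk]
    have hx0 : 0 ≤ x.2 := hnn x (by rw [hxt]; simp)
    rw [hxt, List.foldl_cons]
    rcases lt_or_eq_of_le hx0 with hlt | heq
    · have hstep : pvStep ("General", 0) x = x := by simp [pvStep, hlt]
      rw [hstep, ← hm]
      have hmpos : (0 : Int) < m.2 := lt_of_lt_of_le hlt (pvStep_mono t x)
      rw [if_neg (fun h => h.elim hdsz (by simpa using (by omega : ¬ m.2 = 0)))]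
    · have hstep : pvStep ("General", 0) x = ("General", 0) := by
        simp [pvStep, ← heq]
      rw [hstep]
      rcases pvStep_seed t ("General", 0) x (by simpa using heq) with ⟨hG, hX⟩ | ⟨hEq, hImp⟩
      · have hmx : m = x := by rw [hm, hX]
        rw [hG]
        rw [if_pos (Or.inr (by simp [hmx, ← heq]))]
      · rw [hEq, ← hm]
        have hmpos : (0 : Int) < m.2 := by
          rw [hm, ← hEq]
          simpa using hImp
        rw [if_neg (fun h => h.elim hdsz (by simpa using (by omega : ¬ m.2 = 0)))]

-- ---- B equals the same argmax fold ----

theorem B_eq_fold (answers : List (String × String))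
    (segment_map : List (String × List (String × List String))) :
    determine_segment_py_alt answers segment_map
      = (((PySem.Dict.ofList segment_map).items.map
            (fun p => (p.1, scoreOfA (PySem.Dict.ofList answers) p.2))).foldl
          pvStep ("General", 0)).1 := by
  unfold determine_segment_py_alt
  have hkeys : (PySem.Dict.ofList segment_map : PySem.Dict String (List (String × List String))).keys
      = (PySem.Dict.ofList segment_map).items.map (fun p => p.1) := rfl
  rw [hkeys, List.foldl_map]
  congr 1
  rw [List.foldl_map]
  apply PySem.List.foldl_congr_mem
  intro bs p hp
  rw [pvScoresB_eq_scoreOfA answers segment_map p hp]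
  rfl

-- ===== VERDICT (by name: the statement is the Claim_ definition above) =====
theorem determine_segment_py_spec : Claim_equal_determine_segment_py := by
  intro answers segment_map _
  show determine_segment_py answers segment_map = determine_segment_py_alt answers segment_map
  rw [A_eq_fold, B_eq_fold]
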